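-- pv_equiv track=rewrite | github.com/vals-ai/proof-bench | proof_bench/utils.py | strip_comment_blocks
-- ===== SOURCE A (Python) =====
-- def _detect_commented_lines(lines: list[str]) -> list[bool]:
--     """Check which lines are inside Lean comment blocks (/- ... -/).
--
--     Limitation: only detects /- that starts a line (after stripping). Mid-line
--     block comment openings are silently ignored, so multi-line comments that
--     begin in the middle of a line will not be stripped. Closing lines (-/) are
--     also marked as commented, so any code after -/ on the same line is lost.
--     Both are acceptable given Lean headers always place /- at line starts.
--     """
--     in_comment = False
--     result = []
--
--     for line in lines:
--         stripped = line.strip()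
--
--         if stripped.startswith("--") and not in_comment:
--             result.append(True)
--             continue
--
--         if stripped.startswith("/-") and not in_comment:
--             in_comment = True
--
--         if "-/" in stripped and in_comment:
--             result.append(True)
--             in_comment = False
--             continue
--
--         result.append(in_comment)
--
--     assert len(lines) == len(result), "The length of lines and result must be equal."
--
--     return result
--
-- def strip_comment_blocks(code: str) -> str:
--     """Remove all comments (both single-line -- and multi-line /- ... -/) from code."""
--     lines = code.split("\n")
--     in_comment_flags = _detect_commented_lines(lines)
--
--     result_lines = []
--     for line, is_in_comment in zip(lines, in_comment_flags, strict=True):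
--         if not is_in_comment:
--             result_lines.append(line)
--
--     return "\n".join(result_lines)
-- ===== SOURCE B (Python) =====
-- def strip_comment_blocks(code: str) -> str:
--     """Remove all comments (both single-line -- and multi-line /- ... -/) from code."""
--     kept = []
--     in_comment = False
--     for line in code.split("\n"):
--         stripped = line.strip()
--         if not in_comment:
--             if stripped.startswith("--"):
--                 continue
--             if stripped.startswith("/-"):
--                 if "-/" not in stripped:
--                     in_comment = True
--                 continue
--             kept.append(line)
--         else:
--             if "-/" in stripped:
--                 in_comment = False
--     return "\n".join(kept)
-- ===== Notes on version B (the rewrite author's own statement) =====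
-- stated objective: simpler
-- what changed: Replaces A's two-pass design (a helper computing a full boolean mask, then a zip-and-filter pass) with one single-pass loop over the split lines that carries the in_comment flag and appends kept lines directly, eliminating the helper, the mask list and the zip.
import Mathlib
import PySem

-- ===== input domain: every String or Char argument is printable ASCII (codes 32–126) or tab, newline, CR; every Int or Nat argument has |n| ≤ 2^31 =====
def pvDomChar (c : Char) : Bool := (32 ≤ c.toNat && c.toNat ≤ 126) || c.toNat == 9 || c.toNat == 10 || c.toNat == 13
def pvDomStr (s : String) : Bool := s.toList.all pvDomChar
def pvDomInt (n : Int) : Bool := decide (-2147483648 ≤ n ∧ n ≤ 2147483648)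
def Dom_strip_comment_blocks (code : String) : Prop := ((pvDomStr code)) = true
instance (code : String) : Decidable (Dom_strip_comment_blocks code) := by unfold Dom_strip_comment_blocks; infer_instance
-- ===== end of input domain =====

-- B fuses A's two passes (boolean mask + filter) into one single-pass loop that appends kept lines directly; objective: simpler.


-- ===== PORT A =====
-- _detect_commented_lines: fold over the lines carrying the in_comment flag, producing the boolean mask
def pvDetect : List String → Bool → List Bool
  | [], _ => []
  | line :: rest, inc =>
    let stripped := PySem.Str.strip line
    if PySem.Str.startswith stripped "--" && !inc then
      true :: pvDetect rest inc
    else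
      let inc2 := if PySem.Str.startswith stripped "/-" && !inc then true else inc
      if PySem.Str.isIn "-/" stripped && inc2 then
        true :: pvDetect rest false
      else
        inc2 :: pvDetect rest inc2

def strip_comment_blocks (code : String) : String :=
  -- code.split("\n"): sep is the non-empty literal "\n", so split? is always some
  let lines := (PySem.Str.split? code "\n").getD []
  let flags := pvDetect lines false
  let resultLines := (lines.zip flags).foldl
    (fun acc p => if !p.2 then acc ++ [p.1] else acc) []
  PySem.Str.join "\n" resultLines

-- ===== PORT B =====
-- single pass: keep or drop each line directly while carrying in_comment
def pvKeep : List String → Bool → List String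
  | [], _ => []
  | line :: rest, inc =>
    let stripped := PySem.Str.strip line
    if !inc then
      if PySem.Str.startswith stripped "--" then pvKeep rest inc
      else if PySem.Str.startswith stripped "/-" then
        pvKeep rest (!(PySem.Str.isIn "-/" stripped))
      else line :: pvKeep rest inc
    else
      if PySem.Str.isIn "-/" stripped then pvKeep rest false
      else pvKeep rest inc

def strip_comment_blocks_alt (code : String) : String :=
  PySem.Str.join "\n" (pvKeep ((PySem.Str.split? code "\n").getD []) false)

-- ===== PRECONDITION & SPEC =====
def Spec_strip_comment_blocks (code : String) (out : String) : Prop := out = strip_comment_blocks_alt code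
instance (code : String) (out : String) : Decidable (Spec_strip_comment_blocks code out) := by unfold Spec_strip_comment_blocks; infer_instance

-- ===== CLAIM (what is proved, stated in full; the proofs are below) =====
def Claim_equal_strip_comment_blocks : Prop := ∀ (code : String), Dom_strip_comment_blocks code → Spec_strip_comment_blocks code (strip_comment_blocks code)

-- ===== LEMMAS AND PROOFS =====
-- filtering the lines by A's mask equals B's single pass, for any starting flag and accumulator
theorem pvZip_foldl_eq_pvKeep (lines : List String) (inc : Bool) (acc : List String) :
    (lines.zip (pvDetect lines inc)).foldl
      (fun acc p => if !p.2 then acc ++ [p.1] else acc) acc = acc ++ pvKeep lines inc := by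
  induction lines generalizing inc acc with
  | nil => simp [pvDetect, pvKeep]
  | cons line rest ih =>
    simp only [Bool.not_eq_true'] at ih
    by_cases hinc : inc <;>
      by_cases h1 : PySem.Chars.startswith (PySem.Chars.strip line.toList) ['-', '-'] <;>
        by_cases h2 : PySem.Chars.startswith (PySem.Chars.strip line.toList) ['/', '-'] <;>
          by_cases h3 : PySem.Chars.isIn ['-', '/'] (PySem.Chars.strip line.toList) <;>
            simp [pvDetect, pvKeep, hinc, h1, h2, h3, ih]

-- ===== VERDICT (by name: the statement is the Claim_ definition above) =====
theorem strip_comment_blocks_spec : Claim_equal_strip_comment_blocks := by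
  intro code _
  unfold Spec_strip_comment_blocks strip_comment_blocks strip_comment_blocks_alt
  simp only []
  rw [pvZip_foldl_eq_pvKeep]
  simp
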